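-- pv_equiv track=rewrite | github.com/tzolnai/ASRT_pupil_analysis | extend_trial_data.py | computeMissingDataStreak
-- ===== SOURCE A (Python) =====
-- def computeMissingDataStreak(data_table):
--     missing_data_streak_column = []
--     pupil_data_column = data_table["pupil_data"]
--
--     for i in range(len(pupil_data_column)):
--         max_streak = 0
--         missing_data_streak_count = 0
--         pupil_data = pupil_data_column[i].strip('][').split(', ')
--         for j in range(len(pupil_data)):
--             if str(pupil_data[j]) == 'nan':
--                 missing_data_streak_count += 1
--             else:
--                 missing_data_streak_count = 0
--
--             if max_streak < missing_data_streak_count: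
--                 max_streak = missing_data_streak_count
--         missing_data_streak_column.append(max_streak)
--
--     return missing_data_streak_column
-- ===== SOURCE B (Python) =====
-- def computeMissingDataStreak(data_table):
--     missing_data_streak_column = []
--     for row in data_table["pupil_data"]:
--         tokens = row.strip('][').split(', ')
--         best = 0
--         i = 0
--         n = len(tokens)
--         while i < n:
--             j = i + 1
--             while j < n and tokens[j] == tokens[i]:
--                 j += 1
--             if tokens[i] == 'nan' and j - i > best:
--                 best = j - i
--             i = j
--         missing_data_streak_column.append(best)
--     return missing_data_streak_column
-- ===== Notes on version B (the rewrite author's own statement) =====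
-- stated objective: alternative
-- what changed: B replaces A's per-token running counter with a two-pointer run-length scan: it jumps over each maximal run of equal tokens at once and records the run length when that run is a 'nan' run.
import Mathlib
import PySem

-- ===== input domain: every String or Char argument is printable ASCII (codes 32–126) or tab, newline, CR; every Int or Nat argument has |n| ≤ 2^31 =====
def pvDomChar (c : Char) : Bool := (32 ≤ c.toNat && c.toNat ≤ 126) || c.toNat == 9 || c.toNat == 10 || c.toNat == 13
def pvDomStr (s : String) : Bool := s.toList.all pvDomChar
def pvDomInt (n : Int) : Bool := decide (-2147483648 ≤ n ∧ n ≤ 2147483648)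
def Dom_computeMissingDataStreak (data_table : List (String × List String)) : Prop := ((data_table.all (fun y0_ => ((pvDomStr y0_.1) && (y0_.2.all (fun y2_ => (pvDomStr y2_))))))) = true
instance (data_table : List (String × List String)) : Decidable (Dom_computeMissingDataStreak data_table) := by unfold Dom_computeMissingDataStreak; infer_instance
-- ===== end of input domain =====

-- B replaces A's per-token running counter (+reset, tracked maximum) with a two-pointer
-- run-length scan over maximal runs of equal tokens; same cost, different decomposition.

-- ===== PORT A =====
-- shared tokenization: row.strip('][').split(', ')  (both Pythons perform exactly this;
-- split? is none only for an empty separator, so .getD [] never fires)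
def pvTokens (s : String) : List String :=
  (PySem.Str.split? (PySem.Str.stripChars s "][") ", ").getD []

-- dict[...] lookup on an association list: first match, none = KeyError
def pvLookup : List (String × List String) → String → Option (List String)
  | [], _ => none
  | (k, v) :: rest, key => if k == key then some v else pvLookup rest key

-- one iteration of A's inner j-loop body (updates (max_streak, missing_data_streak_count))
def pvStepA (st : Int × Int) (tok : String) : Int × Int :=
  let cnt := if tok == "nan" then st.2 + 1 else 0
  let ms := if st.1 < cnt then cnt else st.1
  (ms, cnt)

-- A's inner 'for j in range(len(pupil_data))' loop for one row
def pvRowA (s : String) : Int :=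
  ((PySem.List.pyRange 0 ((pvTokens s).length : Int) 1).foldl
      (fun st j => pvStepA st (PySem.List.pyGetD (pvTokens s) j "")) (0, 0)).1

def computeMissingDataStreak (data_table : List (String × List String)) : List Int :=
  match pvLookup data_table "pupil_data" with
  | none => []   -- KeyError: excluded by Pre_
  | some pupil_data_column =>
    (PySem.List.pyRange 0 (pupil_data_column.length : Int) 1).foldl
      (fun acc i => acc ++ [pvRowA (PySem.List.pyGetD pupil_data_column i "")])
      []

-- ===== PORT B =====
-- B's two-pointer while loops: each step consumes one maximal run of tokens equal to the head
def pvMaxNanRun : List String → Int → Int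
  | [], best => best
  | t :: rest, best =>
    let runlen : Int := ((rest.takeWhile (fun x => x == t)).length : Int) + 1
    let best' := if t == "nan" && decide (best < runlen) then runlen else best
    pvMaxNanRun (rest.dropWhile (fun x => x == t)) best'
termination_by ts _ => ts.length
decreasing_by
  exact Nat.lt_succ_of_le (List.length_dropWhile_le _ _)

def computeMissingDataStreak_alt (data_table : List (String × List String)) : List Int :=
  match pvLookup data_table "pupil_data" with
  | none => []   -- KeyError: excluded by Pre_
  | some pupil_data_column =>
    pupil_data_column.map (fun row => pvMaxNanRun (pvTokens row) 0)

-- ===== PRECONDITION & SPEC =====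
-- Pre_ excludes exactly the tables without a "pupil_data" key, on which A raises KeyError.
def Pre_computeMissingDataStreak (data_table : List (String × List String)) : Prop :=
  (data_table.any (fun p => p.1 == "pupil_data")) = true
instance (data_table : List (String × List String)) : Decidable (Pre_computeMissingDataStreak data_table) := by unfold Pre_computeMissingDataStreak; infer_instance

def pvWitness_computeMissingDataStreak : (List (String × List String)) :=
  [("pupil_data", ["[nan, 1.2, nan, nan]", "0.5"])]

def Spec_computeMissingDataStreak (data_table : List (String × List String)) (out : List Int) : Prop := out = computeMissingDataStreak_alt data_table
instance (data_table : List (String × List String)) (out : List Int) : Decidable (Spec_computeMissingDataStreak data_table out) := by unfold Spec_computeMissingDataStreak; infer_instance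

-- ===== CLAIM (what is proved, stated in full; the proofs are below) =====
def Claim_equal_computeMissingDataStreak : Prop := ∀ (data_table : List (String × List String)), Dom_computeMissingDataStreak data_table → Pre_computeMissingDataStreak data_table → Spec_computeMissingDataStreak data_table (computeMissingDataStreak data_table)

-- ===== LEMMAS AND PROOFS =====

-- A's inner fold over a block of (k+1) consecutive 'nan' tokens
theorem foldA_nan_run (k : Nat) : ∀ (ms cnt : Int),
    List.foldl pvStepA (ms, cnt) (List.replicate (k + 1) "nan")
      = (max ms (cnt + k + 1), cnt + k + 1) := by
  induction k with
  | zero =>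
    intro ms cnt
    simp [pvStepA, max_def]
    split_ifs <;> omega
  | succ k ih =>
    intro ms cnt
    rw [List.replicate_succ, List.foldl_cons]
    have h1 : pvStepA (ms, cnt) "nan" = (max ms (cnt + 1), cnt + 1) := by
      simp [pvStepA, max_def]; split_ifs <;> omega
    rw [h1, ih]
    simp only [Prod.mk.injEq, max_def]
    push_cast
    split_ifs <;> omega

-- A's inner fold over a nonempty block of non-'nan' tokens keeps ms and zeroes cnt
theorem foldA_other_run : ∀ (l : List String) (t : String) (ms cnt : Int),
    t ≠ "nan" → (∀ x ∈ l, x ≠ "nan") → 0 ≤ ms →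
    List.foldl pvStepA (ms, cnt) (t :: l) = (ms, 0) := by
  intro l
  induction l with
  | nil =>
    intro t ms cnt ht _ hms
    simp [pvStepA, ht]
    omega
  | cons u rest ih =>
    intro t ms cnt ht hl hms
    have step : pvStepA (ms, cnt) t = (ms, 0) := by
      simp [pvStepA, ht]; omega
    rw [List.foldl_cons, step]
    exact ih u ms 0 (hl u (by simp)) (fun x hx => hl x (by simp [hx])) hms

theorem takeWhile_eq_replicate (t : String) : ∀ (l : List String),
    l.takeWhile (fun x => x == t) = List.replicate (l.takeWhile (fun x => x == t)).length t := by
  intro l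
  induction l with
  | nil => simp
  | cons u rest ih =>
    by_cases h : u = t
    · subst h
      simp only [List.takeWhile_cons, beq_self_eq_true, if_true, List.length_cons,
        List.replicate_succ]
      exact congrArg (u :: ·) ih
    · simp [h]

-- the bridge: A's running-counter fold equals B's run-length scan, for any start value ms ≥ 0
theorem rowA_eq_maxNanRun : ∀ (n : Nat) (ts : List String), ts.length ≤ n → ∀ (ms : Int), 0 ≤ ms →
    (List.foldl pvStepA (ms, 0) ts).1 = pvMaxNanRun ts ms := by
  intro n
  induction n with
  | zero =>
    intro ts hlen ms _
    have : ts = [] := List.eq_nil_of_length_eq_zero (Nat.le_zero.mp hlen)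
    subst this
    simp [pvMaxNanRun]
  | succ n ih =>
    intro ts hlen ms hms
    match ts with
    | [] => simp [pvMaxNanRun]
    | t :: rest =>
      obtain ⟨tk, dr, htk, hdr⟩ :
          ∃ tk dr, tk = rest.takeWhile (fun x => x == t) ∧ dr = rest.dropWhile (fun x => x == t) :=
        ⟨_, _, rfl, rfl⟩
      have hsplit : tk ++ dr = rest := by
        rw [htk, hdr]; exact List.takeWhile_append_dropWhile
      have hdrlen : dr.length ≤ n := by
        have h1 : dr.length ≤ rest.length := by rw [hdr]; exact List.length_dropWhile_le _ _
        have h2 : rest.length + 1 ≤ n + 1 := hlen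
        omega
      rw [pvMaxNanRun, ← htk, ← hdr]
      by_cases ht : t = "nan"
      · subst ht
        have hrepl : tk = List.replicate tk.length "nan" := by
          rw [htk]; exact takeWhile_eq_replicate "nan" rest
        have hrun : ("nan" :: rest) = List.replicate (tk.length + 1) "nan" ++ dr := by
          rw [List.replicate_succ]
          simp only [List.cons_append]
          rw [← hrepl, hsplit]
      -- best' of B is max ms (runlen)
        have hbest' : (if ("nan" : String) == "nan" && decide (ms < (tk.length : Int) + 1)
            then (tk.length : Int) + 1 else ms) = max ms (0 + (tk.length : Int) + 1) := by
          simp only [beq_self_eq_true, Bool.true_and, decide_eq_true_eq, max_def]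
          split_ifs <;> omega
        rw [hrun, List.foldl_append, foldA_nan_run, hbest']
        have hM0 : 0 ≤ max ms (0 + (tk.length : Int) + 1) := le_trans hms (le_max_left _ _)
        set M := max ms (0 + (tk.length : Int) + 1) with hM
        match hdr2 : dr, hdr with
        | [], _ => simp [pvMaxNanRun]
        | u :: rr, hdr =>
          have hu : u ≠ "nan" := by
            have hh := List.head?_dropWhile_not (p := fun x => x == "nan") (l := rest)
            rw [← hdr] at hh
            simp only [List.head?_cons] at hh
            simpa using hh
          have h1 : pvStepA (M, 0 + (tk.length : Int) + 1) u = (M, 0) := by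
            simp [pvStepA, hu]; omega
          have h2 : pvStepA (M, 0) u = (M, 0) := by
            simp [pvStepA, hu]; omega
          rw [List.foldl_cons, h1]
          have hih := ih (u :: rr) hdrlen M hM0
          rw [List.foldl_cons, h2] at hih
          exact hih
      · have hall : ∀ x ∈ tk, x ≠ "nan" := by
          intro x hx
          rw [htk] at hx
          have hxt : (x == t) = true := List.mem_takeWhile_imp (p := fun y => y == t) (l := rest) hx
          have hxeq : x = t := by simpa using hxt
          rw [hxeq]; exact ht
        have hrun : (t :: rest) = (t :: tk) ++ dr := by
          simp only [List.cons_append]; rw [hsplit]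
        have hbest' : (if (t == "nan") && decide (ms < (tk.length : Int) + 1)
            then (tk.length : Int) + 1 else ms) = ms := by
          simp [ht]
        rw [hrun, List.foldl_append, foldA_other_run tk t ms 0 ht hall hms, hbest']
        exact ih dr hdrlen ms hms

theorem pvRowA_eq (s : String) : pvRowA s = pvMaxNanRun (pvTokens s) 0 := by
  unfold pvRowA
  rw [PySem.List.foldl_pyRange_zero_pyGetD' (pvTokens s) "" pvStepA (0, 0)]
  exact rowA_eq_maxNanRun (pvTokens s).length (pvTokens s) le_rfl 0 le_rfl

-- ===== VERDICT (by name: the statement is the Claim_ definition above) =====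
theorem computeMissingDataStreak_spec : Claim_equal_computeMissingDataStreak := by
  intro data_table _ _
  unfold Spec_computeMissingDataStreak computeMissingDataStreak computeMissingDataStreak_alt
  cases h : pvLookup data_table "pupil_data" with
  | none => rfl
  | some col =>
    simp only []
    rw [PySem.List.foldl_pyRange_zero_pyGetD' col "" (fun acc s => acc ++ [pvRowA s]) []]
    rw [PySem.List.foldl_append_singleton_eq_map]
    exact List.map_congr_left (fun row _ => pvRowA_eq row)
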